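-- pv_equiv track=rewrite | github.com/nmartin15/mARB2.0- | app/services/edi/parser_optimized.py | _get_remittance_blocks
-- ===== SOURCE A (Python) =====
-- from typing import List, Dict, Optional, Iterator, Tuple, Generator
--
-- def _get_remittance_blocks(segments: List[List[str]]) -> List[List[List[str]]]:
--     """
--     Get remittance blocks starting with LX segment.
--     Each LX segment starts a new claim remittance.
--
--     Args:
--         segments: List of all EDI segments in the file
--
--     Returns:
--         List of remittance blocks, where each block is a list of segments
--     """
--     remittance_blocks = []
--     current_block = []
--
--     # Pre-allocate if we can estimate
--     estimated_blocks = max(1, len(segments) // 30)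
--     if estimated_blocks > 10:
--         remittance_blocks = [None] * min(estimated_blocks, 1000)
--         remittance_blocks.clear()
--
--     # Cache termination segment IDs for faster lookup
--     termination_segments = {"SE", "GE", "IEA"}
--
--     for seg in segments:
--         if not seg:
--             continue
--
--         seg_id = seg[0]
--         if not seg_id:
--             continue
--
--         # Check if this is an LX segment (starts a new remittance block)
--         if seg_id == "LX":
--             # If we have a current block, save it
--             if current_block:
--                 remittance_blocks.append(current_block)
--                 current_block = []
--
--             # Start new remittance block
--             current_block.append(seg)
--         elif current_block:
--             # Add segment to current remittance block
--             # Stop at next LX, SE, GE, or IEA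
--             if seg_id in termination_segments:
--                 # Termination segment - save current block and don't add termination segment
--                 remittance_blocks.append(current_block)
--                 current_block = []
--             else:
--                 # Regular segment - add to current block
--                 current_block.append(seg)
--
--     # Don't forget the last remittance block
--     if current_block:
--         remittance_blocks.append(current_block)
--
--     return remittance_blocks
-- ===== SOURCE B (Python) =====
-- from typing import List
--
-- _STOPS = ("SE", "GE", "IEA", "LX")
--
--
-- def _scan_block(ms: List[List[str]]):
--     """Split ms into (segments before the first stop marker, remainder from it)."""
--     for k, s in enumerate(ms):
--         if s[0] in _STOPS:
--             return ms[:k], ms[k:]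
--     return ms, []
--
--
-- def _get_remittance_blocks(segments: List[List[str]]) -> List[List[List[str]]]:
--     # Filter once to the meaningful segments, then cut blocks at LX starts.
--     ms = [s for s in segments if s and s[0]]
--     blocks = []
--     while ms:
--         head = ms[0]
--         if head[0] == "LX":
--             body, ms = _scan_block(ms[1:])
--             blocks.append([head] + body)
--         else:
--             ms = ms[1:]
--     return blocks
-- ===== Notes on version B (the rewrite author's own statement) =====
-- stated objective: alternative
-- what changed: Replaces the single accumulator-with-flags pass by a filter-to-meaningful-segments pass followed by block extraction: at each LX a helper scans forward to the next SE/GE/IEA/LX marker and the block is cut out wholesale, so no current-block/flag state is threaded through the loop.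
import Mathlib
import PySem

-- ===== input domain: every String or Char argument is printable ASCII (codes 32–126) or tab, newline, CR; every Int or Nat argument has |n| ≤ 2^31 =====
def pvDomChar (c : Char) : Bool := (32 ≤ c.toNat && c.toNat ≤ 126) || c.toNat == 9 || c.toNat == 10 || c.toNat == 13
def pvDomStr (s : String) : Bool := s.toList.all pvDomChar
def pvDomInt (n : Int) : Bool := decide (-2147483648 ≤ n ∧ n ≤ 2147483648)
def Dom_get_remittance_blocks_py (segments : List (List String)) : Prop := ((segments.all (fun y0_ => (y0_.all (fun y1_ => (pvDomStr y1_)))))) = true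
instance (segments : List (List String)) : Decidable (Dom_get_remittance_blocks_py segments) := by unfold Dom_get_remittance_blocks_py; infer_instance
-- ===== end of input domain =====

-- B replaces A's accumulator-with-flags single pass by filter-then-cut-blocks-at-LX; alternative decomposition, same cost.

-- ===== PORT A =====
-- One step of A's loop over `seg`, state = (remittance_blocks, current_block).
def pvStepA (st : List (List (List String)) × List (List String)) (seg : List String) :
    List (List (List String)) × List (List String) :=
  match seg with
  | [] => st                                  -- `if not seg: continue`
  | segId :: _ =>
    if segId = "" then st                     -- `if not seg_id: continue`
    else if segId = "LX" then
      if st.2 ≠ [] then (st.1 ++ [st.2], [seg])      -- save current block, start new one with seg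
      else (st.1, st.2 ++ [seg])                     -- current_block.append(seg)
    else if st.2 ≠ [] then
      if segId = "SE" ∨ segId = "GE" ∨ segId = "IEA" then (st.1 ++ [st.2], [])
      else (st.1, st.2 ++ [seg])
    else st

def get_remittance_blocks_py (segments : List (List String)) : List (List (List String)) :=
  -- A's pre-allocation (`[None]*k` then `.clear()`) leaves remittance_blocks = [] either way.
  let st := segments.foldl pvStepA ([], [])
  if st.2 ≠ [] then st.1 ++ [st.2] else st.1

-- ===== PORT B =====
-- `s and s[0]` filter of Source B
def pvMeaningful (s : List String) : Bool :=
  match s with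
  | [] => false
  | h :: _ => h ≠ ""

def pvStops : List String := ["SE", "GE", "IEA", "LX"]

-- Source B's _scan_block: (segments before the first stop marker, remainder from it).
-- s[0] ported as headD "" — exact here since callers pass only nonempty segments.
def pvScanBlock (ms : List (List String)) : List (List String) × List (List String) :=
  match ms with
  | [] => ([], [])
  | s :: rest =>
    if s.headD "" ∈ pvStops then ([], s :: rest)
    else
      let p := pvScanBlock rest
      (s :: p.1, p.2)

theorem pvScanBlock_len (ms : List (List String)) : (pvScanBlock ms).2.length ≤ ms.length := by
  induction ms with
  | nil => simp [pvScanBlock]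
  | cons s rest ih =>
    simp only [pvScanBlock]
    split
    · simp
    · simpa using Nat.le_succ_of_le ih

-- Source B's while loop over the filtered list ms.
def pvBlocksOf (ms : List (List String)) : List (List (List String)) :=
  match ms with
  | [] => []
  | s :: rest =>
    if s.headD "" = "LX" then
      (s :: (pvScanBlock rest).1) :: pvBlocksOf (pvScanBlock rest).2
    else pvBlocksOf rest
termination_by ms.length
decreasing_by
  · exact Nat.lt_succ_of_le (pvScanBlock_len rest)
  · simp

def get_remittance_blocks_py_alt (segments : List (List String)) : List (List (List String)) :=
  pvBlocksOf (segments.filter pvMeaningful)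

-- ===== PRECONDITION & SPEC =====
def Spec_get_remittance_blocks_py (segments : List (List String)) (out : List (List (List String))) : Prop := out = get_remittance_blocks_py_alt segments
instance (segments : List (List String)) (out : List (List (List String))) : Decidable (Spec_get_remittance_blocks_py segments out) := by unfold Spec_get_remittance_blocks_py; infer_instance

-- ===== CLAIM (what is proved, stated in full; the proofs are below) =====
def Claim_equal_get_remittance_blocks_py : Prop := ∀ (segments : List (List String)), Dom_get_remittance_blocks_py segments → Spec_get_remittance_blocks_py segments (get_remittance_blocks_py segments)

-- ===== LEMMAS AND PROOFS =====

-- A's step ignores non-meaningful segments, so the fold runs over the filtered list.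
theorem pvFoldA_filter (segments : List (List String))
    (st : List (List (List String)) × List (List String)) :
    segments.foldl pvStepA st = (segments.filter pvMeaningful).foldl pvStepA st := by
  induction segments generalizing st with
  | nil => rfl
  | cons s rest ih =>
    match s with
    | [] => simpa [pvMeaningful, List.filter] using ih st
    | h :: t =>
      by_cases hh : h = ""
      · simp [pvMeaningful, List.filter, hh, pvStepA, ih]
      · simp [pvMeaningful, List.filter, hh, List.foldl, ih]

-- finalize of A
def pvFin (st : List (List (List String)) × List (List String)) : List (List (List String)) :=
  if st.2 ≠ [] then st.1 ++ [st.2] else st.1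

-- Key invariant over a list of meaningful segments.
theorem pvMain (ms : List (List String)) (hm : ∀ s ∈ ms, pvMeaningful s = true) :
    ∀ (blocks : List (List (List String))) (cur : List (List String)),
    pvFin (ms.foldl pvStepA (blocks, cur)) =
      blocks ++ (if cur = [] then pvBlocksOf ms
                 else (cur ++ (pvScanBlock ms).1) :: pvBlocksOf (pvScanBlock ms).2) := by
  induction ms with
  | nil =>
    intro blocks cur
    by_cases hc : cur = [] <;> simp [pvFin, pvBlocksOf, pvScanBlock, hc]
  | cons s rest ih =>
    intro blocks cur
    have hs : pvMeaningful s = true := hm s (by simp)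
    have hrest : ∀ x ∈ rest, pvMeaningful x = true := fun x hx => hm x (by simp [hx])
    match s with
    | [] => simp [pvMeaningful] at hs
    | h :: t =>
      have hh : h ≠ "" := by simpa [pvMeaningful] using hs
      have hfold : ((h :: t) :: rest).foldl pvStepA (blocks, cur)
          = rest.foldl pvStepA (pvStepA (blocks, cur) (h :: t)) := rfl
      by_cases hLX : h = "LX"
      · -- LX: close the current block (if any) and start a new one
        have hstep : pvStepA (blocks, cur) (h :: t)
            = (if cur = [] then (blocks, [h :: t]) else (blocks ++ [cur], [h :: t])) := by
          by_cases hc : cur = [] <;> simp [pvStepA, hLX, hc]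
        have hscan : pvScanBlock ((h :: t) :: rest) = ([], (h :: t) :: rest) := by
          simp [pvScanBlock, pvStops, hLX]
        have hblk : pvBlocksOf ((h :: t) :: rest)
            = ((h :: t) :: (pvScanBlock rest).1) :: pvBlocksOf (pvScanBlock rest).2 := by
          rw [pvBlocksOf]; simp [hLX]
        by_cases hc : cur = []
        · rw [hfold, hstep, if_pos hc, ih hrest blocks [h :: t], hc]
          simp [hblk]
        · rw [hfold, hstep, if_neg hc, ih hrest (blocks ++ [cur]) [h :: t]]
          simp [hc, hscan, hblk]
      · by_cases hT : h = "SE" ∨ h = "GE" ∨ h = "IEA"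
        · -- termination segment
          have hstop : h ∈ pvStops := by rcases hT with h1 | h1 | h1 <;> simp [pvStops, h1]
          have hstep : pvStepA (blocks, cur) (h :: t)
              = (if cur = [] then (blocks, cur) else (blocks ++ [cur], [])) := by
            by_cases hc : cur = [] <;> simp [pvStepA, hh, hLX, hT, hc]
          have hscan : pvScanBlock ((h :: t) :: rest) = ([], (h :: t) :: rest) := by
            simp [pvScanBlock, hstop]
          have hblk : pvBlocksOf ((h :: t) :: rest) = pvBlocksOf rest := by
            rw [pvBlocksOf]; simp [hLX]
          by_cases hc : cur = []
          · rw [hfold, hstep, if_pos hc, ih hrest blocks cur]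
            simp [hc, hblk]
          · rw [hfold, hstep, if_neg hc, ih hrest (blocks ++ [cur]) []]
            simp [hc, hscan, hblk]
        · -- regular segment
          have hstop : h ∉ pvStops := by
            simp only [pvStops, List.mem_cons, List.not_mem_nil, or_false]
            push Not at hT
            simp [hLX, hT.1, hT.2.1, hT.2.2]
          have hstep : pvStepA (blocks, cur) (h :: t)
              = (if cur = [] then (blocks, cur) else (blocks, cur ++ [h :: t])) := by
            by_cases hc : cur = [] <;> simp [pvStepA, hh, hLX, hT, hc]
          have hscan : pvScanBlock ((h :: t) :: rest)
              = ((h :: t) :: (pvScanBlock rest).1, (pvScanBlock rest).2) := by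
            simp [pvScanBlock, hstop]
          have hblk : pvBlocksOf ((h :: t) :: rest) = pvBlocksOf rest := by
            rw [pvBlocksOf]; simp [hLX]
          by_cases hc : cur = []
          · rw [hfold, hstep, if_pos hc, ih hrest blocks cur]
            simp [hc, hblk]
          · rw [hfold, hstep, if_neg hc, ih hrest blocks (cur ++ [h :: t])]
            simp [hc, hscan]

-- ===== VERDICT (by name: the statement is the Claim_ definition above) =====
theorem get_remittance_blocks_py_spec : Claim_equal_get_remittance_blocks_py := by
  intro segments _
  show get_remittance_blocks_py segments = get_remittance_blocks_py_alt segments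
  unfold get_remittance_blocks_py get_remittance_blocks_py_alt
  rw [pvFoldA_filter]
  have h := pvMain (segments.filter pvMeaningful)
    (fun s hs => List.of_mem_filter hs) [] []
  simpa [pvFin] using h
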